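-- pv_equiv track=rewrite | github.com/hmoriya/amplifier-experiment | amplifier/parasol_book_v54/content_generator.py | _insert_after_heading
-- ===== SOURCE A (Python) =====
-- def _insert_after_heading(content: str, heading_keyword: str,
--                         insert_content: str) -> str:
--     """Insert content after a heading containing keyword."""
--     lines = content.split('\n')
--     inserted = False
--
--     for i, line in enumerate(lines):
--         if line.startswith('#') and heading_keyword in line:
--             # Find the end of this section
--             section_end = i + 1
--             while section_end < len(lines) and not lines[section_end].startswith('#'):
--                 section_end += 1
--
--             # Insert before next heading or at end
--             lines.insert(section_end, insert_content)
--             inserted = True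
--             break
--
--     if not inserted:
--         lines.append(insert_content)
--
--     return '\n'.join(lines)
-- ===== SOURCE B (Python) =====
-- def _insert_after_heading(content: str, heading_keyword: str,
--                         insert_content: str) -> str:
--     """Insert content after a heading containing keyword (single-pass state machine)."""
--     found = False
--     inserted = False
--     out = []
--     for line in content.split('\n'):
--         if found and not inserted and line.startswith('#'):
--             out.append(insert_content)
--             inserted = True
--         out.append(line)
--         if not found and line.startswith('#') and heading_keyword in line:
--             found = True
--     if not inserted:
--         out.append(insert_content)
--     return '\n'.join(out)
-- ===== Notes on version B (the rewrite author's own statement) =====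
-- stated objective: alternative
-- what changed: Replaced the find-index-then-scan-forward-then-list.insert approach with a single forward pass over the lines that maintains found/inserted flags and emits the output list directly, appending the content once at the end when no insertion point was reached.
import Mathlib
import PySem

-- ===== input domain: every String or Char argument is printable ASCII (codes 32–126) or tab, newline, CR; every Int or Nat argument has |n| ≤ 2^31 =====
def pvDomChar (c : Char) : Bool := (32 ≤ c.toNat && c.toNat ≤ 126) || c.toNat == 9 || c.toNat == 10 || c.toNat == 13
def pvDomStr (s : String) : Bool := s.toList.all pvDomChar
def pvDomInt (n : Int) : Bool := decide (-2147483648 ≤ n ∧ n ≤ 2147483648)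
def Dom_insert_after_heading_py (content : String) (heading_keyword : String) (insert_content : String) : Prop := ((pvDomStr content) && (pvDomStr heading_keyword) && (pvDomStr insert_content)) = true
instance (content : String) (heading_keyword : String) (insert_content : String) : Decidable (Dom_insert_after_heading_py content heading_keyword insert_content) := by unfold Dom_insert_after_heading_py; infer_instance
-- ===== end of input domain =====

-- B rewrites A's find-heading / scan-to-section-end / list.insert structure as one
-- forward pass with found/inserted flags that emits the result list directly (alternative decomposition, same cost).

-- ===== PORT A =====
-- the inner `while section_end < len(lines) and not lines[section_end].startswith('#')` loop
def pvAWhile (lines : List String) (sectionEnd : Nat) : Nat :=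
  if h : sectionEnd < lines.length then
    if PySem.Str.startswith lines[sectionEnd] "#" then sectionEnd
    else pvAWhile lines (sectionEnd + 1)
  else sectionEnd
termination_by lines.length - sectionEnd

-- the `for i, line in enumerate(lines)` loop with break; falling off the end
-- reaches the `if not inserted: lines.append(insert_content)` tail
def pvAFor (heading_keyword insert_content : String) (lines : List String) (i : Nat) : List String :=
  if h : i < lines.length then
    if PySem.Str.startswith lines[i] "#" && PySem.Str.isIn heading_keyword lines[i] then
      PySem.List.insert lines (pvAWhile lines (i + 1)) insert_content
    else pvAFor heading_keyword insert_content lines (i + 1)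
  else lines ++ [insert_content]
termination_by lines.length - i

def insert_after_heading_py (content : String) (heading_keyword : String) (insert_content : String) : String :=
  PySem.Str.join "\n" (pvAFor heading_keyword insert_content ((PySem.Str.split? content "\n").getD []) 0)

-- ===== PORT B =====
-- single pass emitting the output list, carrying the found/inserted flags
def pvBLoop (heading_keyword insert_content : String) (lines : List String)
    (found inserted : Bool) : List String :=
  match lines with
  | [] => if !inserted then [insert_content] else []
  | line :: rest =>
    let doIns := found && !inserted && PySem.Str.startswith line "#"
    let inserted' := inserted || doIns
    let found' := found || (PySem.Str.startswith line "#" && PySem.Str.isIn heading_keyword line)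
    (if doIns then [insert_content, line] else [line]) ++
      pvBLoop heading_keyword insert_content rest found' inserted'

def insert_after_heading_py_alt (content : String) (heading_keyword : String) (insert_content : String) : String :=
  PySem.Str.join "\n" (pvBLoop heading_keyword insert_content ((PySem.Str.split? content "\n").getD []) false false)

-- ===== PRECONDITION & SPEC =====
def Spec_insert_after_heading_py (content : String) (heading_keyword : String) (insert_content : String) (out : String) : Prop := out = insert_after_heading_py_alt content heading_keyword insert_content
instance (content : String) (heading_keyword : String) (insert_content : String) (out : String) : Decidable (Spec_insert_after_heading_py content heading_keyword insert_content out) := by unfold Spec_insert_after_heading_py; infer_instance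

-- ===== CLAIM (what is proved, stated in full; the proofs are below) =====
def Claim_equal_insert_after_heading_py : Prop := ∀ (content : String) (heading_keyword : String) (insert_content : String), Dom_insert_after_heading_py content heading_keyword insert_content → Spec_insert_after_heading_py content heading_keyword insert_content (insert_after_heading_py content heading_keyword insert_content)

-- ===== LEMMAS AND PROOFS =====

-- number of leading lines not starting with '#'
def pvSkipLen : List String → Nat
  | [] => 0
  | l :: r => if PySem.Str.startswith l "#" then 0 else pvSkipLen r + 1

theorem pvSkipLen_le (t : List String) : pvSkipLen t ≤ t.length := by
  induction t with
  | nil => simp [pvSkipLen]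
  | cons l r ih => simp [pvSkipLen]; split <;> omega

theorem pvAWhile_eq (lines : List String) (j : Nat) (hj : j ≤ lines.length) :
    pvAWhile lines j = j + pvSkipLen (lines.drop j) := by
  by_cases h : j < lines.length
  · rw [List.drop_eq_getElem_cons h]
    rw [pvAWhile]
    by_cases hs : PySem.Chars.startswith lines[j].toList ['#'] = true
    · simp [h, hs, pvSkipLen]
    · rw [pvAWhile_eq lines (j + 1) (by omega)]
      simp [h, hs, pvSkipLen]
      omega
  · have : j = lines.length := by omega
    subst this
    rw [pvAWhile]
    simp [pvSkipLen]
termination_by lines.length - j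

theorem pvBLoop_inserted (kw ins : String) (t : List String) (f : Bool) :
    pvBLoop kw ins t f true = t := by
  induction t generalizing f with
  | nil => simp [pvBLoop]
  | cons l r ih => simp [pvBLoop, ih]

theorem pvBLoop_found (kw ins : String) (t : List String) :
    pvBLoop kw ins t true false =
      t.take (pvSkipLen t) ++ ins :: t.drop (pvSkipLen t) := by
  induction t with
  | nil => simp [pvBLoop, pvSkipLen]
  | cons l r ih =>
    by_cases hs : PySem.Chars.startswith l.toList ['#'] = true
    · simp [pvBLoop, hs, pvSkipLen, pvBLoop_inserted]
    · simp [pvBLoop, hs, pvSkipLen, ih]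

theorem pvAFor_eq_pvBLoop (kw ins : String) (lines : List String) (i : Nat)
    (hi : i ≤ lines.length) :
    pvAFor kw ins lines i =
      lines.take i ++ pvBLoop kw ins (lines.drop i) false false := by
  by_cases h : i < lines.length
  · rw [List.drop_eq_getElem_cons h]
    rw [pvAFor]
    have ht : lines.take (i + 1) = lines.take i ++ [lines[i]] := by
      rw [List.take_add_one]; simp [List.getElem?_eq_getElem h]
    by_cases hhit : (PySem.Chars.startswith lines[i].toList ['#']
        && PySem.Chars.isIn kw.toList lines[i].toList) = true
    · have hsk := pvSkipLen_le (List.drop (i + 1) lines)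
      have hlen : (List.drop (i + 1) lines).length = lines.length - (i + 1) := by simp
      have hw := pvAWhile_eq lines (i + 1) (by omega)
      set k := pvSkipLen (List.drop (i + 1) lines) with hk
      have hins : PySem.List.insert lines ((i + 1 + k : Nat) : Int) ins =
          List.take (i + 1 + k) lines ++ ins :: List.drop (i + 1 + k) lines :=
        PySem.List.insert_natCast lines (i + 1 + k) ins (by omega)
      have hd : (List.drop (i + 1) lines).drop k = List.drop (i + 1 + k) lines := by
        rw [List.drop_drop]
      have hta : List.take (i + 1 + k) lines =
          List.take (i + 1) lines ++ (List.drop (i + 1) lines).take k := List.take_add ..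
      have hhit' : (PySem.Str.startswith lines[i] "#" && PySem.Str.isIn kw lines[i]) = true := by
        simpa using hhit
      rw [dif_pos h, if_pos hhit', hw, hins, hta, ht, ← hd]
      simp [pvBLoop, pvBLoop_found, hhit, ← hk]
      rw [ht, List.append_assoc]
      rfl
    · have hhit' : ¬ (PySem.Str.startswith lines[i] "#" && PySem.Str.isIn kw lines[i]) = true := by
        simpa using hhit
      have hh : (PySem.Chars.startswith lines[i].toList ['#']
          && PySem.Chars.isIn kw.toList lines[i].toList) = false := by
        simpa using hhit
      rw [dif_pos h, if_neg hhit', pvAFor_eq_pvBLoop kw ins lines (i + 1) (by omega),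
        ht, List.append_assoc]
      simp [pvBLoop, hh]
  · have : i = lines.length := by omega
    subst this
    rw [pvAFor]
    simp [pvBLoop]
termination_by lines.length - i

-- ===== VERDICT (by name: the statement is the Claim_ definition above) =====
theorem insert_after_heading_py_spec : Claim_equal_insert_after_heading_py := by
  intro content kw ins _
  show insert_after_heading_py content kw ins = insert_after_heading_py_alt content kw ins
  unfold insert_after_heading_py insert_after_heading_py_alt
  rw [pvAFor_eq_pvBLoop kw ins _ 0 (by omega)]
  simp
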